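-- pv_equiv track=rewrite | github.com/mbasaran77/pyqt_app | plc_recete_conv.py | make_key_arr
-- ===== SOURCE A (Python) =====
-- def make_key_arr(ikili_dizi):
--     """
--     bu fonksiyon ikili dizileri alır ve plc için dizilein başlangıç ve sonu bulur
--     yalnız bu float dizi int yapıldıktan sonra mı olmalı ??
--     :param ikili_dizi:
--     :return:
--     """
--     key_arr = []
--     start = 0
--     for any_list in ikili_dizi:
--         key_arr.append(start)
--         stop = start + len(any_list) - 1
--         key_arr.append(stop)
--         start = stop + 1
--     return key_arr
-- ===== SOURCE B (Python) =====
-- def make_key_arr(ikili_dizi):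
--     prefix = [0]
--     for x in ikili_dizi:
--         prefix.append(prefix[-1] + len(x))
--     return [v for a, b in zip(prefix, prefix[1:]) for v in (a, b - 1)]
-- ===== Notes on version B (the rewrite author's own statement) =====
-- stated objective: alternative
-- what changed: Replaces the running start/stop accumulator emitting pairs inline by a precomputed prefix-sum offset table of sublist lengths, then a separate flattening pass over adjacent prefix pairs.
import Mathlib
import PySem

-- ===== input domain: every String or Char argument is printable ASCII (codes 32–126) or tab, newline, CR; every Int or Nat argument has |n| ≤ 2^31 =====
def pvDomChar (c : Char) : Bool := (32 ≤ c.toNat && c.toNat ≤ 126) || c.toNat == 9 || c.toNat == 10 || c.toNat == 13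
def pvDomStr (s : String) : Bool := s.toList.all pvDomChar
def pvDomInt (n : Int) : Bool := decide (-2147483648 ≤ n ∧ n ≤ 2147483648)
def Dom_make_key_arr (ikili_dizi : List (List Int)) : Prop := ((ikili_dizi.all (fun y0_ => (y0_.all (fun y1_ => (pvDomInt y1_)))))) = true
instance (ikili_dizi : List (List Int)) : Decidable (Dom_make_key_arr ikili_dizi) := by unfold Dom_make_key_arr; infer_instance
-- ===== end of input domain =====

-- ===== PORT A =====
-- B replaces the running start/stop accumulator by a prefix-sum offset table; objective: alternative.
def make_key_arr (ikili_dizi : List (List Int)) : List Int :=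
  (ikili_dizi.foldl
    (fun (st : List Int × Int) any_list =>
      let stop : Int := st.2 + (any_list.length : Int) - 1
      (st.1 ++ [st.2, stop], stop + 1))
    ([], 0)).1

-- ===== PORT B =====
def make_key_arr_alt (ikili_dizi : List (List Int)) : List Int :=
  let pfx : List Int :=
    ikili_dizi.foldl (fun p x => p ++ [p.getLastD 0 + (x.length : Int)]) [0]
  (pfx.zip pfx.tail).flatMap (fun ab => [ab.1, ab.2 - 1])

-- ===== PRECONDITION & SPEC =====
def Spec_make_key_arr (ikili_dizi : List (List Int)) (out : List Int) : Prop := out = make_key_arr_alt ikili_dizi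
instance (ikili_dizi : List (List Int)) (out : List Int) : Decidable (Spec_make_key_arr ikili_dizi out) := by unfold Spec_make_key_arr; infer_instance

-- ===== CLAIM (what is proved, stated in full; the proofs are below) =====
def Claim_equal_make_key_arr : Prop := ∀ (ikili_dizi : List (List Int)), Dom_make_key_arr ikili_dizi → Spec_make_key_arr ikili_dizi (make_key_arr ikili_dizi)

-- ===== LEMMAS AND PROOFS =====

-- ===== VERDICT (by name: the statement is the Claim_ definition above) =====
-- recursive reference form of the output starting at offset s
def pvKeyFrom (s : Int) : List (List Int) → List Int
  | [] => []
  | x :: xs => s :: (s + (x.length : Int) - 1) :: pvKeyFrom (s + (x.length : Int)) xs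

-- recursive reference form of the prefix table starting at offset s
def pvPfx (s : Int) : List (List Int) → List Int
  | [] => [s]
  | x :: xs => s :: pvPfx (s + (x.length : Int)) xs

lemma pvA_foldl (l : List (List Int)) : ∀ (acc : List Int) (s : Int),
    (l.foldl (fun (st : List Int × Int) any_list =>
      let stop : Int := st.2 + (any_list.length : Int) - 1
      (st.1 ++ [st.2, stop], stop + 1)) (acc, s)).1 = acc ++ pvKeyFrom s l := by
  induction l with
  | nil => intro acc s; simp [pvKeyFrom]
  | cons x xs ih =>
      intro acc s
      simp only [List.foldl_cons, pvKeyFrom]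
      rw [ih]
      have : s + (x.length : Int) - 1 + 1 = s + (x.length : Int) := by ring
      rw [this]
      simp

lemma pvB_foldl (l : List (List Int)) : ∀ (acc : List Int) (s : Int),
    (l.foldl (fun p x => p ++ [p.getLastD 0 + (x.length : Int)]) (acc ++ [s]))
      = acc ++ pvPfx s l := by
  induction l with
  | nil => intro acc s; simp [pvPfx]
  | cons x xs ih =>
      intro acc s
      simp only [List.foldl_cons, pvPfx]
      have h1 : (acc ++ [s]).getLastD 0 = s := by simp
      rw [h1]
      have h2 : acc ++ [s] ++ [s + (x.length : Int)] = (acc ++ [s]) ++ [s + (x.length : Int)] := by simp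
      rw [h2, ih (acc ++ [s])]
      simp

lemma pvZip_eq (l : List (List Int)) : ∀ (s : Int),
    ((pvPfx s l).zip (pvPfx s l).tail).flatMap (fun ab => [ab.1, ab.2 - 1])
      = pvKeyFrom s l := by
  induction l with
  | nil => intro s; simp [pvPfx, pvKeyFrom]
  | cons x xs ih =>
      intro s
      simp only [pvPfx, pvKeyFrom, List.tail_cons]
      have hcons : pvPfx (s + (x.length : Int)) xs
          = (s + (x.length : Int)) :: (pvPfx (s + (x.length : Int)) xs).tail := by
        cases xs <;> simp [pvPfx]
      have ihx := ih (s + (x.length : Int))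
      rw [hcons] at ihx
      simp only [List.tail_cons] at ihx
      rw [hcons, List.zip_cons_cons, List.flatMap_cons, ihx]
      simp

theorem make_key_arr_spec : Claim_equal_make_key_arr := by
  intro l _
  unfold Spec_make_key_arr make_key_arr make_key_arr_alt
  have hA := pvA_foldl l [] 0
  simp only [List.nil_append] at hA
  have hB := pvB_foldl l [] 0
  simp only [List.nil_append] at hB
  rw [hA, hB, pvZip_eq]
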